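-- pv_equiv track=rewrite | github.com/ftclark3/DNA-BACon | seq_writer.py | base_check
-- ===== SOURCE A (Python) =====
-- def base_check(sequence):
--     if 'AAA' in sequence or 'GGG' in sequence or 'CCC' in sequence or 'TTT' in sequence:
--         return True
--     gc_count = 0
--     for i in sequence:
--         if i == 'G' or i == 'C':
--             gc_count += 1
--     if gc_count//len(sequence) >= 0.6:
--         return True
-- ===== SOURCE B (Python) =====
-- def base_check(sequence):
--     # single linear scan: sliding 3-window for the four DNA triples, fused with the G/C count
--     n = len(sequence)
--     gc_count = 0
--     for i in range(n):
--         c = sequence[i]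
--         if i + 2 < n and c in 'ACGT' and sequence[i + 1] == c and sequence[i + 2] == c:
--             return True
--         if c == 'G' or c == 'C':
--             gc_count += 1
--     if gc_count // n >= 0.6:
--         return True
-- ===== Notes on version B (the rewrite author's own statement) =====
-- stated objective: alternative
-- what changed: Replaced four separate substring searches plus a second full counting loop by one fused linear scan that checks a sliding 3-character window for the four DNA triples and counts G/C in the same pass.
import Mathlib
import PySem

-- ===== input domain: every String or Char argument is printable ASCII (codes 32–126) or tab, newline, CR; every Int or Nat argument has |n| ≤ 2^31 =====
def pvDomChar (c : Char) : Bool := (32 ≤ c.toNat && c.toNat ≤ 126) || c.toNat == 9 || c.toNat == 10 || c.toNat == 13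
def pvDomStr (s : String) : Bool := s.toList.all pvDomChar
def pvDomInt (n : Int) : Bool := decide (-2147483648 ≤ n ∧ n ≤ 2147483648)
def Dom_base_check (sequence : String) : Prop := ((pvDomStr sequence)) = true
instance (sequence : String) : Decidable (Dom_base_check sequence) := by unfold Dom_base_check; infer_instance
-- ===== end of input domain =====

-- B replaces A's four substring searches + separate counting loop by one fused linear
-- scan (sliding 3-window + G/C count in the same pass); same cost class, one traversal.

-- ===== PORT A =====
-- 'gc_count//len(sequence) >= 0.6': the left side is an Int, so '>= 0.6' is exactly '≥ 1'.
def base_check (sequence : String) : Option Bool :=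
  if PySem.Str.isIn "AAA" sequence ∨ PySem.Str.isIn "GGG" sequence ∨
     PySem.Str.isIn "CCC" sequence ∨ PySem.Str.isIn "TTT" sequence then
    some true
  else
    let gc : Int := sequence.toList.foldl (fun g i => if i = 'G' ∨ i = 'C' then g + 1 else g) 0
    if 1 ≤ PySem.Int.floordiv gc (PySem.Str.len sequence) then some true else none

-- ===== PORT B =====
-- the window test "i + 2 < n and c in 'ACGT' and sequence[i+1] == c and sequence[i+2] == c" of Source B
def bcGuard (c : Char) (rest : List Char) : Bool :=
  match rest with
  | b :: d :: _ => (c == 'A' || c == 'C' || c == 'G' || c == 'T') && b == c && d == c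
  | _ => false

-- Source B's 'for i in range(n)' loop: the suffix sequence[i:] drives the recursion, state = gc count
def bcAltLoop (n : Int) : List Char → Int → Option Bool
  | [], gc => if 1 ≤ PySem.Int.floordiv gc n then some true else none
  | c :: rest, gc =>
    if bcGuard c rest then some true
    else bcAltLoop n rest (if c = 'G' ∨ c = 'C' then gc + 1 else gc)

def base_check_alt (sequence : String) : Option Bool :=
  bcAltLoop (PySem.Str.len sequence) sequence.toList 0

-- ===== PRECONDITION & SPEC =====
-- Pre_ excludes only the empty string, on which A (and B) raise ZeroDivisionError.
def Pre_base_check (sequence : String) : Prop := sequence ≠ ""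
instance (sequence : String) : Decidable (Pre_base_check sequence) := by unfold Pre_base_check; infer_instance
def pvWitness_base_check : String := "GATC"

def Spec_base_check (sequence : String) (out : Option Bool) : Prop := out = base_check_alt sequence
instance (sequence : String) (out : Option Bool) : Decidable (Spec_base_check sequence out) := by unfold Spec_base_check; infer_instance

-- ===== CLAIM (what is proved, stated in full; the proofs are below) =====
def Claim_equal_base_check : Prop := ∀ (sequence : String), Dom_base_check sequence → Pre_base_check sequence → Spec_base_check sequence (base_check sequence)

-- ===== LEMMAS AND PROOFS =====

abbrev HasTrip (l : List Char) : Prop :=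
  ['A','A','A'] <:+: l ∨ ['G','G','G'] <:+: l ∨ ['C','C','C'] <:+: l ∨ ['T','T','T'] <:+: l

theorem triple_prefix_iff (a c : Char) (rest : List Char) :
    ([a,a,a] <+: c :: rest) ↔ c = a ∧ ∃ t, rest = a :: a :: t := by
  constructor
  · rintro ⟨t, ht⟩
    simp only [List.cons_append, List.nil_append, List.cons.injEq] at ht
    exact ⟨ht.1.symm, t, ht.2.symm⟩
  · rintro ⟨rfl, t, rfl⟩
    exact ⟨t, rfl⟩

theorem bcGuard_iff (c : Char) (rest : List Char) :
    bcGuard c rest = true ↔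
      (c = 'A' ∨ c = 'C' ∨ c = 'G' ∨ c = 'T') ∧ ∃ t, rest = c :: c :: t := by
  match rest with
  | [] => simp [bcGuard]
  | [b] => simp [bcGuard]
  | b :: d :: t =>
      simp only [bcGuard, Bool.and_eq_true, Bool.or_eq_true, beq_iff_eq, List.cons.injEq]
      constructor
      · rintro ⟨⟨hc, rfl⟩, rfl⟩
        exact ⟨by tauto, t, rfl, rfl, rfl⟩
      · rintro ⟨hc, t', rfl, rfl, rfl⟩
        exact ⟨⟨by tauto, rfl⟩, rfl⟩

theorem hasTrip_cons (c : Char) (rest : List Char) :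
    HasTrip (c :: rest) ↔ bcGuard c rest = true ∨ HasTrip rest := by
  rw [bcGuard_iff]
  simp only [HasTrip, List.infix_cons_iff, triple_prefix_iff]
  constructor
  · rintro ((⟨rfl, ht⟩ | h) | (⟨rfl, ht⟩ | h) | (⟨rfl, ht⟩ | h) | (⟨rfl, ht⟩ | h))
    · exact Or.inl ⟨Or.inl rfl, ht⟩
    · exact Or.inr (Or.inl h)
    · exact Or.inl ⟨Or.inr (Or.inr (Or.inl rfl)), ht⟩
    · exact Or.inr (Or.inr (Or.inl h))
    · exact Or.inl ⟨Or.inr (Or.inl rfl), ht⟩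
    · exact Or.inr (Or.inr (Or.inr (Or.inl h)))
    · exact Or.inl ⟨Or.inr (Or.inr (Or.inr rfl)), ht⟩
    · exact Or.inr (Or.inr (Or.inr (Or.inr h)))
  · rintro (⟨(rfl | rfl | rfl | rfl), ht⟩ | h | h | h | h)
    · exact Or.inl (Or.inl ⟨rfl, ht⟩)
    · exact Or.inr (Or.inr (Or.inl (Or.inl ⟨rfl, ht⟩)))
    · exact Or.inr (Or.inl (Or.inl ⟨rfl, ht⟩))
    · exact Or.inr (Or.inr (Or.inr (Or.inl ⟨rfl, ht⟩)))
    · exact Or.inl (Or.inr h)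
    · exact Or.inr (Or.inl (Or.inr h))
    · exact Or.inr (Or.inr (Or.inl (Or.inr h)))
    · exact Or.inr (Or.inr (Or.inr (Or.inr h)))

-- B's loop computes: triple found ⇒ True; otherwise A's tail test with gc + (#G/C in l)
theorem bcAltLoop_eq (n : Int) (l : List Char) (gc : Int) :
    bcAltLoop n l gc =
      if HasTrip l then some true
      else if 1 ≤ PySem.Int.floordiv (gc + (l.countP (fun i => i = 'G' ∨ i = 'C') : Int)) n
           then some true else none := by
  induction l generalizing gc with
  | nil =>
      rw [if_neg (by simp [List.infix_nil])]
      simp [bcAltLoop]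
  | cons c rest ih =>
      by_cases hg : bcGuard c rest = true
      · unfold bcAltLoop
        rw [if_pos hg, if_pos ((hasTrip_cons c rest).2 (Or.inl hg))]
      · have ht : HasTrip (c :: rest) ↔ HasTrip rest := by
          rw [hasTrip_cons]; tauto
        unfold bcAltLoop
        rw [if_neg hg, ih]
        by_cases htr : HasTrip rest
        · rw [if_pos htr, if_pos (ht.2 htr)]
        · rw [if_neg htr, if_neg (fun h => htr (ht.1 h))]
          have hcount : ((if c = 'G' ∨ c = 'C' then gc + 1 else gc) +
              (rest.countP (fun i => i = 'G' ∨ i = 'C') : Int)) =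
              gc + ((c :: rest).countP (fun i => i = 'G' ∨ i = 'C') : Int) := by
            by_cases hc : c = 'G' ∨ c = 'C'
            · rw [if_pos hc, List.countP_cons, if_pos (by simpa using hc)]
              push_cast; ring
            · rw [if_neg hc, List.countP_cons, if_neg (by simpa using hc)]
              push_cast; ring
          rw [hcount]

theorem isIn_or_iff (s : String) :
    (PySem.Str.isIn "AAA" s ∨ PySem.Str.isIn "GGG" s ∨
     PySem.Str.isIn "CCC" s ∨ PySem.Str.isIn "TTT" s) ↔ HasTrip s.toList := by
  simp only [HasTrip]
  rw [show (PySem.Str.isIn "AAA" s = true) ↔ _ from PySem.Str.isIn_iff_infix _ _,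
      show (PySem.Str.isIn "GGG" s = true) ↔ _ from PySem.Str.isIn_iff_infix _ _,
      show (PySem.Str.isIn "CCC" s = true) ↔ _ from PySem.Str.isIn_iff_infix _ _,
      show (PySem.Str.isIn "TTT" s = true) ↔ _ from PySem.Str.isIn_iff_infix _ _]
  have h1 : "AAA".toList = ['A','A','A'] := by decide
  have h2 : "GGG".toList = ['G','G','G'] := by decide
  have h3 : "CCC".toList = ['C','C','C'] := by decide
  have h4 : "TTT".toList = ['T','T','T'] := by decide
  rw [h1, h2, h3, h4]

theorem foldl_gc (l : List Char) :
    l.foldl (fun g i => if i = 'G' ∨ i = 'C' then g + 1 else g) (0 : Int) =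
      (l.countP (fun i => i = 'G' ∨ i = 'C') : Int) := by
  simpa using PySem.List.foldl_ite_add_one (fun i => i = 'G' ∨ i = 'C') l (0 : Int)

-- ===== VERDICT (by name: the statement is the Claim_ definition above) =====
theorem base_check_spec : Claim_equal_base_check := by
  intro s _ _
  unfold Spec_base_check base_check base_check_alt
  rw [bcAltLoop_eq]
  by_cases ht : HasTrip s.toList
  · rw [if_pos ((isIn_or_iff s).2 ht), if_pos ht]
  · rw [if_neg (fun h => ht ((isIn_or_iff s).1 h)), if_neg ht]
    simp [foldl_gc]
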